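-- pv_equiv track=rewrite | github.com/Rikudou529/CSV_JSON_PreProcessing-Tool | translator.py | remove_common_prefix
-- ===== SOURCE A (Python) =====
-- def remove_common_prefix(sequences_list):
--     # Transpose the list to get all parts in each position across the sequences
--     if len(sequences_list) == 1:
--         return sequences_list
--
--     transposed = list(zip(*sequences_list))
--
--     # Determine the index up to which all parts are identical across all sequences
--     prefix_length = 0
--     for parts in transposed:
--         if all(part == parts[0] for part in parts):
--             prefix_length += 1
--         else:
--             break
--
--     # Remove the common prefix from each sequence
--     return [seq[prefix_length:] for seq in sequences_list]
-- ===== SOURCE B (Python) =====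
-- def remove_common_prefix(sequences_list):
--     if len(sequences_list) <= 1:
--         return sequences_list
--     first = sequences_list[0]
--     p = len(first)
--     for seq in sequences_list[1:]:
--         j = 0
--         n = min(len(first), len(seq))
--         while j < n and first[j] == seq[j]:
--             j += 1
--         p = min(p, j)
--     return [seq[p:] for seq in sequences_list]
-- ===== Notes on version B (the rewrite author's own statement) =====
-- stated objective: alternative
-- what changed: Replaces the column-wise pass over a fully materialised transpose (zip(*...)) with a row-wise reduction: each row is compared against the first row up to the current prefix bound, shrinking it; no transposed tuples are built.
import Mathlib
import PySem

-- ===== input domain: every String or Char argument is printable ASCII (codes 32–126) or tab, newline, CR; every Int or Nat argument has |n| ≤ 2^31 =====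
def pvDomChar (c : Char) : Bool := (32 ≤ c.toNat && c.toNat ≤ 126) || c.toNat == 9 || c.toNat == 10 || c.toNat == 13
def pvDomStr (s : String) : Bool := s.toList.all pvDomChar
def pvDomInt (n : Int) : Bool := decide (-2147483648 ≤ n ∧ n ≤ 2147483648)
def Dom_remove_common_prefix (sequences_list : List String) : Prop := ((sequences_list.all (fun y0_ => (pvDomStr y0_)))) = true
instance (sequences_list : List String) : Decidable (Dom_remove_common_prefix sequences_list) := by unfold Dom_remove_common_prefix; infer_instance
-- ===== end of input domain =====

-- B strips the common prefix by a row-wise reduction against the first row instead of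
-- A's column-wise scan of a materialised transpose; return values agree on all inputs.

-- ===== PORT A =====
-- zip(*sequences_list): truncating transpose, exact step-for-step (stop at first exhausted row)
def pvZipStar (xss : List (List Char)) : List (List Char) :=
  match xss with
  | [] => []
  | x :: rest =>
    if h : ((x :: rest).all fun l => !l.isEmpty) then
      (x :: rest).map (fun l => l.headD ' ') :: pvZipStar ((x :: rest).map List.tail)
    else []
termination_by (xss.headD []).length
decreasing_by
  simp only [List.all_cons, Bool.and_eq_true, Bool.not_eq_eq_eq_not, Bool.not_true] at h
  simp only [List.map_cons, List.headD_cons]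
  cases x with
  | nil => simp [List.isEmpty] at h
  | cons a as => simp [List.tail]

-- the for-loop over `transposed` with its break
def pvPrefLen : List (List Char) → Nat
  | [] => 0
  | parts :: rest =>
    match parts with
    | [] => 0  -- unreachable: zip never yields an empty tuple
    | c :: cs => if (c :: cs).all (fun d => d == c) then pvPrefLen rest + 1 else 0

def remove_common_prefix (sequences_list : List String) : List String :=
  if sequences_list.length = 1 then sequences_list
  else
    let transposed := pvZipStar (sequences_list.map String.toList)
    let p := pvPrefLen transposed
    sequences_list.map (fun s => PySem.Str.slice s (some (p : Int)) none)

-- ===== PORT B =====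
-- the inner while loop: common-prefix length of two rows
def pvCp : List Char → List Char → Nat
  | a :: as, b :: bs => if a == b then pvCp as bs + 1 else 0
  | _, _ => 0

def remove_common_prefix_alt (sequences_list : List String) : List String :=
  if sequences_list.length ≤ 1 then sequences_list
  else
    match sequences_list with
    | [] => []  -- unreachable: length ≥ 2 here
    | f :: rest =>
      let fl := f.toList
      let p := rest.foldl (fun p s => min p (pvCp fl s.toList)) fl.length
      sequences_list.map (fun s => PySem.Str.slice s (some (p : Int)) none)

-- ===== PRECONDITION & SPEC =====
def Spec_remove_common_prefix (sequences_list : List String) (out : List String) : Prop := out = remove_common_prefix_alt sequences_list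
instance (sequences_list : List String) (out : List String) : Decidable (Spec_remove_common_prefix sequences_list out) := by unfold Spec_remove_common_prefix; infer_instance

-- ===== CLAIM (what is proved, stated in full; the proofs are below) =====
def Claim_equal_remove_common_prefix : Prop := ∀ (sequences_list : List String), Dom_remove_common_prefix sequences_list → Spec_remove_common_prefix sequences_list (remove_common_prefix sequences_list)

-- ===== LEMMAS AND PROOFS =====

theorem pvFoldlMinZero (l : List Nat) : l.foldl min 0 = 0 := by
  induction l with
  | nil => rfl
  | cons a l ih => simpa [Nat.zero_min] using ih

theorem pvFoldlMinLeInit (l : List Nat) (a : Nat) : l.foldl min a ≤ a := by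
  induction l generalizing a with
  | nil => simp
  | cons x l ih =>
    exact le_trans (ih (min a x)) (Nat.min_le_left _ _)

theorem pvFoldlMinLeMem (l : List Nat) (a b : Nat) (hb : b ∈ l) : l.foldl min a ≤ b := by
  induction l generalizing a with
  | nil => cases hb
  | cons x l ih =>
    rcases List.mem_cons.mp hb with h | h
    · subst h
      exact le_trans (pvFoldlMinLeInit l (min a b)) (Nat.min_le_right _ _)
    · exact ih _ h

theorem pvFoldlMinZeroMem (l : List Nat) (a : Nat) (h : 0 ∈ l) : l.foldl min a = 0 :=
  Nat.le_zero.mp (pvFoldlMinLeMem l a 0 h)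

theorem pvFoldlMinSucc (l : List Nat) (a : Nat) :
    (l.map (· + 1)).foldl min (a + 1) = l.foldl min a + 1 := by
  induction l generalizing a with
  | nil => rfl
  | cons x l ih =>
    simp only [List.map_cons, List.foldl_cons]
    have hmin : min (a + 1) (x + 1) = min a x + 1 := by omega
    rw [hmin, ih]

-- A's prefix length over the transpose equals B's row-wise min
theorem pvMainLen (x : List Char) (rs : List (List Char)) :
    pvPrefLen (pvZipStar (x :: rs)) = (rs.map (pvCp x)).foldl min x.length := by
  induction x generalizing rs with
  | nil =>
    rw [pvZipStar]
    simp only [List.isEmpty_nil, List.all_cons, Bool.not_true, Bool.false_and]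
    have hmap : rs.map (pvCp []) = rs.map (fun _ => 0) := by
      apply List.map_congr_left
      intro s _
      cases s <;> rfl
    rw [hmap]
    simp only [List.length_nil]
    exact (pvFoldlMinZero _).symm
  | cons c cs ih =>
    by_cases hgood : ∀ s ∈ rs, ∃ t, s = c :: t
    · -- every row starts with c
      have hne : ((c :: cs) :: rs).all (fun l => !l.isEmpty) = true := by
        simp only [List.all_cons, Bool.and_eq_true, List.all_eq_true]
        constructor
        · rfl
        · intro s hs
          obtain ⟨t, rfl⟩ := hgood s hs
          rfl
      rw [pvZipStar, dif_pos hne]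
      -- heads column is all c
      have hheads : ((c :: cs) :: rs).map (fun l => l.headD ' ') = c :: rs.map (fun l => l.headD ' ') := by
        simp
      rw [hheads, pvPrefLen]
      have hall : (c :: rs.map (fun l => l.headD ' ')).all (fun d => d == c) = true := by
        simp only [List.all_cons, beq_self_eq_true, Bool.true_and, List.all_eq_true]
        intro d hd
        obtain ⟨s, hs, rfl⟩ := List.mem_map.mp hd
        obtain ⟨t, rfl⟩ := hgood s hs
        simp
      rw [if_pos hall]
      have htails : ((c :: cs) :: rs).map List.tail = cs :: rs.map List.tail := by simp
      rw [htails, ih]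
      have hmap : rs.map (pvCp (c :: cs)) = ((rs.map List.tail).map (pvCp cs)).map (· + 1) := by
        rw [List.map_map, List.map_map]
        apply List.map_congr_left
        intro s hs
        obtain ⟨t, rfl⟩ := hgood s hs
        simp [pvCp, Function.comp]
      rw [hmap]
      simp only [List.length_cons]
      exact (pvFoldlMinSucc _ _).symm
    · -- some row is empty or differs at position 0: both sides are 0
      push Not at hgood
      obtain ⟨s, hs, hbad⟩ := hgood
      have hrhs : (rs.map (pvCp (c :: cs))).foldl min (c :: cs).length = 0 := by
        apply pvFoldlMinZeroMem
        apply List.mem_map.mpr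
        refine ⟨s, hs, ?_⟩
        cases s with
        | nil => rfl
        | cons b t =>
          have hcb : ¬ c = b := by
            intro h; exact hbad t (by rw [h])
          simp [pvCp, hcb]
      rw [hrhs]
      by_cases hne : ((c :: cs) :: rs).all (fun l => !l.isEmpty) = true
      · rw [pvZipStar, dif_pos hne]
        -- s is nonempty (from hne) so its head differs from c
        have hsne : s ≠ [] := by
          intro h
          have := (List.all_eq_true.mp hne) s (List.mem_cons_of_mem _ hs)
          rw [h] at this
          simp at this
        cases s with
        | nil => exact absurd rfl hsne
        | cons b t =>
          have hbc : ¬ b = c := by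
            intro h; exact hbad t (by rw [h])
          have hheads : ((c :: cs) :: rs).map (fun l => l.headD ' ') = c :: rs.map (fun l => l.headD ' ') := by
            simp
          rw [hheads, pvPrefLen]
          have hall : (c :: rs.map (fun l => l.headD ' ')).all (fun d => d == c) = false := by
            apply List.all_eq_false.mpr
            refine ⟨(b :: t).headD ' ', List.mem_cons_of_mem _ (List.mem_map.mpr ⟨b :: t, hs, rfl⟩), ?_⟩
            simp only [List.headD_cons]
            simp [hbc]
          rw [if_neg (by rw [hall]; exact Bool.false_ne_true)]
      · rw [pvZipStar, dif_neg hne]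
        rfl

-- ===== VERDICT (by name: the statement is the Claim_ definition above) =====
theorem remove_common_prefix_spec : Claim_equal_remove_common_prefix := by
  intro l _
  unfold Spec_remove_common_prefix
  match l with
  | [] => rfl
  | [s] => rfl
  | f :: g :: rs =>
    have hlen1 : ¬ (f :: g :: rs).length = 1 := by simp
    have hlen2 : ¬ (f :: g :: rs).length ≤ 1 := by simp
    rw [remove_common_prefix, if_neg hlen1, remove_common_prefix_alt, if_neg hlen2]
    simp only
    have h1 : pvPrefLen (pvZipStar ((f :: g :: rs).map String.toList))
        = (g :: rs).foldl (fun p s => min p (pvCp f.toList s.toList)) f.toList.length := by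
      rw [List.map_cons, pvMainLen, List.map_map, List.foldl_map]
      rfl
    rw [h1]
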